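-- pv_equiv track=rewrite | github.com/iacchus/tunebook | thesession-scraper.py | remove_empty
-- ===== SOURCE A (Python) =====
-- def remove_empty(teh_string):
--     teh_string = teh_string.replace('\n\n','\n')
--     teh_string = teh_string.replace('\r','\n')
--     newlist=list()
--     the_list = teh_string.split('\n')
--
--     for line in the_list:
--         if len(line) > 0:
--             newlist.append(line)
--
--     return "\n".join(newlist)
-- ===== SOURCE B (Python) =====
-- def remove_empty(teh_string):
--     # single left-to-right scan: copy content chars, emitting one '\n'
--     # between maximal runs of line breaks that separate content
--     out = []
--     prev_break = True
--     for ch in teh_string: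
--         if ch == '\n' or ch == '\r':
--             prev_break = True
--         else:
--             if prev_break and out:
--                 out.append('\n')
--             out.append(ch)
--             prev_break = False
--     return ''.join(out)
-- ===== Notes on version B (the rewrite author's own statement) =====
-- stated objective: simpler
-- what changed: B replaces A's replace/replace/split/filter/join pipeline (several passes and an intermediate list of lines) by a single left-to-right character scan with a prev_break flag that copies content characters and emits one newline between content groups; A's redundant first replace pass (collapsing doubled newlines) is dropped.
import Mathlib
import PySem

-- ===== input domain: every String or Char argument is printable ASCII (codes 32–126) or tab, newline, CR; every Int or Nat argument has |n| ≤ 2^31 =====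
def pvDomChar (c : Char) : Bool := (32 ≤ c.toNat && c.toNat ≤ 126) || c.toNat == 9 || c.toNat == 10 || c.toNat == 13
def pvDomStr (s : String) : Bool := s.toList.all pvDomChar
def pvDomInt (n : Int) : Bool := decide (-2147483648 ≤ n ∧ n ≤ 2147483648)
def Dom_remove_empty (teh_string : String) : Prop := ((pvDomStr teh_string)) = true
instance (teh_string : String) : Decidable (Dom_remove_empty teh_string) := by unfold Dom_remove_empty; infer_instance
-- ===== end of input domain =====

-- B is a single character scan with a prev_break flag instead of A's replace/split/filter/join pipeline (objective: simpler).

-- ===== PORT A =====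
def remove_empty (teh_string : String) : String :=
  let s1 := PySem.Str.replace teh_string "\n\n" "\n"
  let s2 := PySem.Str.replace s1 "\r" "\n"
  let the_list : List String := (PySem.Str.split? s2 "\n").getD []
  let newlist : List String :=
    the_list.foldl (fun acc line => if 0 < PySem.Str.len line then acc ++ [line] else acc) []
  PySem.Str.join "\n" newlist

-- ===== PORT B =====
def remove_empty_alt (teh_string : String) : String :=
  let r := teh_string.toList.foldl
    (fun (st : List Char × Bool) ch =>
      if ch == '\n' || ch == '\r' then (st.1, true)
      else (st.1 ++ (if st.2 && !st.1.isEmpty then ['\n'] else []) ++ [ch], false))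
    ([], true)
  String.ofList r.1

-- ===== PRECONDITION & SPEC =====
def Spec_remove_empty (teh_string : String) (out : String) : Prop := out = remove_empty_alt teh_string
instance (teh_string : String) (out : String) : Decidable (Spec_remove_empty teh_string out) := by unfold Spec_remove_empty; infer_instance

-- ===== CLAIM (what is proved, stated in full; the proofs are below) =====
def Claim_equal_remove_empty : Prop := ∀ (teh_string : String), Dom_remove_empty teh_string → Spec_remove_empty teh_string (remove_empty teh_string)

-- ===== LEMMAS AND PROOFS =====

-- break character ('\n' or '\r')
def pvBr (c : Char) : Bool := c == '\n' || c == '\r'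
-- the '\r' -> '\n' substitution A's second replace performs
def pvSub (c : Char) : Char := if c == '\r' then '\n' else c
-- canonical result of the scan: pvJm true = between groups / at the start, pvJm false = inside a group
def pvJm : Bool → List Char → List Char
  | _, [] => []
  | true, c :: t => if pvBr c then pvJm true t else c :: pvJm false t
  | false, c :: t => if pvBr c then (if pvJm true t = [] then [] else '\n' :: pvJm true t) else c :: pvJm false t

def pvPref (x : List Char) : List Char := if x = [] then [] else '\n' :: x

-- fuel-indexed natural form of replace('\n\n','\n')
def pvRep2 : Nat → List Char → List Char
  | _, [] => []
  | 0, l => l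
  | f+1, '\n' :: '\n' :: t => '\n' :: pvRep2 f t
  | f+1, c :: t => c :: pvRep2 f t

-- one-step equations of the PySem fuel recursions
theorem pvGoR_br (f : Nat) (t acc : List Char) :
    PySem.Chars.replace.go ['\r'] ['\n'] (f+1) ('\r'::t) acc = PySem.Chars.replace.go ['\r'] ['\n'] f t ('\n'::acc) := by
  simp [PySem.Chars.replace.go]

theorem pvGoR_other (f : Nat) (c : Char) (t acc : List Char) (h : c ≠ '\r') :
    PySem.Chars.replace.go ['\r'] ['\n'] (f+1) (c::t) acc = PySem.Chars.replace.go ['\r'] ['\n'] f t (c::acc) := by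
  simp [PySem.Chars.replace.go, List.isPrefixOf, Ne.symm h]

theorem pvGoR_nil (f : Nat) (acc : List Char) :
    PySem.Chars.replace.go ['\r'] ['\n'] (f+1) [] acc = acc.reverse := by
  simp [PySem.Chars.replace.go]

theorem pvGo2_br (f : Nat) (t acc : List Char) :
    PySem.Chars.replace.go ['\n','\n'] ['\n'] (f+1) ('\n'::'\n'::t) acc = PySem.Chars.replace.go ['\n','\n'] ['\n'] f t ('\n'::acc) := by
  simp [PySem.Chars.replace.go, List.isPrefixOf]

theorem pvGo2_other (f : Nat) (c : Char) (t acc : List Char) (h : ¬ (['\n','\n'].isPrefixOf (c::t) = true)) :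
    PySem.Chars.replace.go ['\n','\n'] ['\n'] (f+1) (c::t) acc = PySem.Chars.replace.go ['\n','\n'] ['\n'] f t (c::acc) := by
  simp [PySem.Chars.replace.go, h]

theorem pvGo2_nil (f : Nat) (acc : List Char) :
    PySem.Chars.replace.go ['\n','\n'] ['\n'] (f+1) [] acc = acc.reverse := by
  simp [PySem.Chars.replace.go]

theorem pvGoS_br (f : Nat) (t cur : List Char) (acc : List (List Char)) :
    PySem.Chars.splitOn.go ['\n'] (f+1) ('\n'::t) cur acc = PySem.Chars.splitOn.go ['\n'] f t [] (cur.reverse :: acc) := by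
  simp [PySem.Chars.splitOn.go, List.isPrefixOf]

theorem pvGoS_other (f : Nat) (c : Char) (t cur : List Char) (acc : List (List Char)) (h : c ≠ '\n') :
    PySem.Chars.splitOn.go ['\n'] (f+1) (c::t) cur acc = PySem.Chars.splitOn.go ['\n'] f t (c::cur) acc := by
  simp [PySem.Chars.splitOn.go, List.isPrefixOf, Ne.symm h]

theorem pvGoS_nil (f : Nat) (cur : List Char) (acc : List (List Char)) :
    PySem.Chars.splitOn.go ['\n'] (f+1) [] cur acc = acc.reverse ++ [cur.reverse] := by
  simp [PySem.Chars.splitOn.go]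

theorem pvB_fold (l : List Char) : ∀ (acc : List Char) (prev : Bool), (prev = false → acc ≠ []) →
    (l.foldl
      (fun (st : List Char × Bool) ch =>
        if ch == '\n' || ch == '\r' then (st.1, true)
        else (st.1 ++ (if st.2 && !st.1.isEmpty then ['\n'] else []) ++ [ch], false))
      (acc, prev)).1
    = acc ++ (if prev then (if acc = [] then pvJm true l else pvPref (pvJm true l)) else pvJm false l) := by
  induction l with
  | nil =>
    intro acc prev h
    cases prev <;> simp_all [pvJm, pvPref]
  | cons c t ih =>
    intro acc prev h
    rw [List.foldl_cons]
    by_cases hc : pvBr c = true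
    · have hc' : (c == '\n' || c == '\r') = true := hc
      rw [if_pos hc']
      rw [ih acc true (by simp)]
      cases prev
      · have hacc : acc ≠ [] := h rfl
        simp [pvJm, hc, hacc, pvPref]
      · by_cases hacc : acc = [] <;> simp [pvJm, hc, hacc, pvPref]
    · have hc' : (c == '\n' || c == '\r') = false := by
        simpa [pvBr] using hc
      rw [if_neg (by simp [hc'])]
      rw [ih ((acc ++ if (prev && !acc.isEmpty : Bool) = true then ['\n'] else []) ++ [c]) false (by simp)]
      cases prev
      · simp [pvJm, hc]
      · by_cases hacc : acc = []
        · simp [pvJm, hc, hacc]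
        · have he : acc.isEmpty = false := by simpa [List.isEmpty_iff] using hacc
          simp [pvJm, hc, hacc, pvPref, he]

theorem pvB_toList (s : String) : (remove_empty_alt s).toList = pvJm true s.toList := by
  unfold remove_empty_alt
  rw [String.toList_ofList, pvB_fold s.toList [] true (by simp)]
  simp

-- replace('\r','\n') is charwise substitution
theorem pvR1 : ∀ (fuel : Nat) (l acc : List Char), l.length ≤ fuel →
    PySem.Chars.replace.go ['\r'] ['\n'] fuel l acc = acc.reverse ++ l.map pvSub := by
  intro fuel
  induction fuel with
  | zero =>
    intro l acc h
    have : l = [] := by cases l <;> simp_all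
    subst this; simp [PySem.Chars.replace.go]
  | succ f ih =>
    intro l acc h
    cases l with
    | nil => simp [pvGoR_nil]
    | cons c t =>
      by_cases hc : c = '\r'
      · subst hc
        rw [pvGoR_br, ih t _ (by simpa using h)]
        simp [pvSub]
      · rw [pvGoR_other f c t acc hc, ih t _ (by simpa using h)]
        simp [pvSub, hc]

-- replace('\n\n','\n') computes pvRep2
theorem pvR2 : ∀ (fuel : Nat) (l acc : List Char), l.length ≤ fuel →
    PySem.Chars.replace.go ['\n', '\n'] ['\n'] fuel l acc = acc.reverse ++ pvRep2 fuel l := by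
  intro fuel
  induction fuel with
  | zero =>
    intro l acc h
    have : l = [] := by cases l <;> simp_all
    subst this; simp [PySem.Chars.replace.go, pvRep2]
  | succ f ih =>
    intro l acc h
    cases l with
    | nil => simp [pvGo2_nil, pvRep2]
    | cons c t =>
      by_cases hp : ['\n', '\n'].isPrefixOf (c :: t) = true
      · obtain ⟨hc, t', ht⟩ : c = '\n' ∧ ∃ t', t = '\n' :: t' := by
          cases t with
          | nil => simp [List.isPrefixOf] at hp
          | cons d t' =>
            simp only [List.isPrefixOf, Bool.and_eq_true, beq_iff_eq] at hp
            exact ⟨hp.1.symm, t', by rw [← hp.2.1]⟩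
        subst hc; subst ht
        rw [pvGo2_br, ih t' _ (by simp at h; omega)]
        simp [pvRep2]
      · rw [pvGo2_other f c t acc hp, ih t _ (by simpa using h)]
        have hform : pvRep2 (f+1) (c :: t) = c :: pvRep2 f t := by
          cases t with
          | nil => cases f <;> simp [pvRep2]
          | cons d t' =>
            by_cases hc : c = '\n'
            · by_cases hd : d = '\n'
              · exfalso; apply hp; simp [List.isPrefixOf, hc, hd]
              · subst hc
                cases t' <;> simp_all [pvRep2]
            · cases t' <;> simp_all [pvRep2]
        simp [hform]

-- splitOn '\n' is splitOnP (. == '\n')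
theorem pvS : ∀ (fuel : Nat) (l cur : List Char) (acc : List (List Char)), l.length ≤ fuel →
    PySem.Chars.splitOn.go ['\n'] fuel l cur acc
      = acc.reverse ++ List.modifyHead (cur.reverse ++ ·) (List.splitOnP (· == '\n') l) := by
  intro fuel
  induction fuel with
  | zero =>
    intro l cur acc h
    have : l = [] := by cases l <;> simp_all
    subst this; simp [PySem.Chars.splitOn.go, List.splitOnP_nil]
  | succ f ih =>
    intro l cur acc h
    cases l with
    | nil => simp [pvGoS_nil, List.splitOnP_nil]
    | cons c t =>
      by_cases hc : c = '\n'
      · subst hc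
        rw [pvGoS_br, ih t [] _ (by simpa using h)]
        obtain ⟨g, gs, hg⟩ := List.exists_cons_of_ne_nil (List.splitOnP_ne_nil (· == '\n') t)
        simp [List.splitOnP_cons, hg]
      · rw [pvGoS_other f c t cur acc hc, ih t (c :: cur) acc (by simpa using h)]
        obtain ⟨g, gs, hg⟩ := List.exists_cons_of_ne_nil (List.splitOnP_ne_nil (· == '\n') t)
        simp [List.splitOnP_cons, hc, hg]

-- no '\r' left: splitting on '\n' = splitting on breaks
theorem pvC1 : ∀ (m : List Char), '\r' ∉ m → List.splitOnP (· == '\n') m = List.splitOnP pvBr m := by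
  intro m hm
  induction m with
  | nil => simp
  | cons c t ih =>
    have hc : c ≠ '\r' := by intro h; exact hm (by simp [h])
    have ht := ih (fun h => hm (List.mem_cons_of_mem _ h))
    by_cases hn : c = '\n'
    · simp [List.splitOnP_cons, hn, pvBr, ht]
    · simp [List.splitOnP_cons, hn, pvBr, hc, ht]

-- join of a cons
theorem pvJoinCons (x : List Char) (xs : List (List Char)) :
    PySem.Chars.join ['\n'] (x :: xs) = x ++ (if xs = [] then [] else '\n' :: PySem.Chars.join ['\n'] xs) := by
  cases xs with
  | nil => simp [PySem.Chars.join, List.intercalate]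
  | cons y ys =>
    rw [if_neg (by simp), PySem.Chars.join_cons_cons]
    simp

theorem pvJoinFilterNil (gs : List (List Char)) :
    (gs.filter (fun g => !g.isEmpty) = []) ↔ PySem.Chars.join ['\n'] (gs.filter (fun g => !g.isEmpty)) = [] := by
  cases h : gs.filter (fun g => !g.isEmpty) with
  | nil => simp [PySem.Chars.join, List.intercalate]
  | cons g rest =>
    have hmem : g ∈ gs.filter (fun g => !g.isEmpty) := by rw [h]; exact List.mem_cons_self
    have hg : (!g.isEmpty) = true := (List.mem_filter.mp hmem).2
    have hg' : g ≠ [] := by simpa [List.isEmpty_iff] using hg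
    rw [pvJoinCons]
    constructor <;> intro hh
    · simp at hh
    · exfalso; cases g with
      | nil => exact hg' rfl
      | cons a b => simp at hh

-- main characterisation: join of the nonempty groups = the scan
theorem pvMain : ∀ (t : List Char),
    (PySem.Chars.join ['\n'] ((List.splitOnP pvBr t).filter (fun g => !g.isEmpty)) = pvJm true t)
    ∧ (∀ g gs, List.splitOnP pvBr t = g :: gs →
        g ++ (if gs.filter (fun g => !g.isEmpty) = [] then []
              else '\n' :: PySem.Chars.join ['\n'] (gs.filter (fun g => !g.isEmpty))) = pvJm false t) := by
  intro t
  induction t with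
  | nil =>
    constructor
    · simp [pvJm, PySem.Chars.join, List.intercalate]
    · intro g gs hg
      simp [List.splitOnP_nil] at hg
      simp [hg.1, hg.2, pvJm]
  | cons c t ih =>
    obtain ⟨ih1, ih2⟩ := ih
    by_cases hc : pvBr c = true
    · have hsplit : List.splitOnP pvBr (c :: t) = [] :: List.splitOnP pvBr t := by
        simp [List.splitOnP_cons, hc]
      constructor
      · rw [hsplit]
        have hfil : (([] : List Char) :: List.splitOnP pvBr t).filter (fun g => !g.isEmpty)
            = (List.splitOnP pvBr t).filter (fun g => !g.isEmpty) := by simp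
        rw [hfil, ih1]
        simp [pvJm, hc]
      · intro g gs hg
        rw [hsplit] at hg
        injection hg with hg1 hg2
        subst hg1; subst hg2
        have hjm : pvJm false (c :: t) = if pvJm true t = [] then [] else '\n' :: pvJm true t := by
          simp [pvJm, hc]
        rw [List.nil_append, hjm, ← ih1]
        by_cases hnil : (List.splitOnP pvBr t).filter (fun g => !g.isEmpty) = []
        · rw [if_pos hnil, if_pos ((pvJoinFilterNil _).1 hnil)]
        · rw [if_neg hnil, if_neg (fun hh => hnil ((pvJoinFilterNil _).2 hh))]
    · obtain ⟨g', gs', hg'⟩ := List.exists_cons_of_ne_nil (List.splitOnP_ne_nil pvBr t)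
      have hsplit : List.splitOnP pvBr (c :: t) = (c :: g') :: gs' := by
        simp [List.splitOnP_cons, hc, hg']
      have hii := ih2 g' gs' hg'
      have hjm1 : pvJm true (c :: t) = c :: pvJm false t := by simp [pvJm, hc]
      have hjm2 : pvJm false (c :: t) = c :: pvJm false t := by simp [pvJm, hc]
      constructor
      · rw [hsplit]
        have hfil : ((c :: g') :: gs').filter (fun g => !g.isEmpty)
            = (c :: g') :: gs'.filter (fun g => !g.isEmpty) := by simp
        rw [hfil, pvJoinCons, hjm1, ← hii]
        by_cases hnil : gs'.filter (fun g => !g.isEmpty) = [] <;> simp [hnil]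
      · intro g gs hg
        rw [hsplit] at hg
        injection hg with hg1 hg2
        subst hg1; subst hg2
        rw [hjm2, ← hii]
        simp

-- the scan ignores the '\r' -> '\n' substitution
theorem pvMapSub : ∀ (l : List Char) (b : Bool), pvJm b (l.map pvSub) = pvJm b l := by
  intro l
  induction l with
  | nil => intro b; simp
  | cons c t ih =>
    intro b
    by_cases hc : c = '\r'
    · subst hc
      cases b <;> simp [pvJm, pvSub, pvBr, ih]
    · have hs : pvSub c = c := by simp [pvSub, hc]
      cases b <;> by_cases hbr : pvBr c = true <;>
        simp [pvJm, hs, hbr, ih]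

-- the scan ignores the '\n\n' collapse
theorem pvJ2 : ∀ (fuel : Nat) (l : List Char) (b : Bool), l.length ≤ fuel → pvJm b (pvRep2 fuel l) = pvJm b l := by
  intro fuel
  induction fuel with
  | zero =>
    intro l b h
    have : l = [] := by cases l <;> simp_all
    subst this; simp [pvRep2]
  | succ f ih =>
    intro l b h
    cases l with
    | nil => simp [pvRep2]
    | cons c t =>
      by_cases hnn : c = '\n' ∧ ∃ t', t = '\n' :: t'
      · obtain ⟨hc, t', ht⟩ := hnn
        subst hc; subst ht
        have hrep : pvRep2 (f+1) ('\n' :: '\n' :: t') = '\n' :: pvRep2 f t' := by simp [pvRep2]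
        have hlen : t'.length ≤ f := by simp at h; omega
        have hbr : pvBr '\n' = true := by decide
        cases b <;>
          · rw [hrep]
            simp [pvJm, hbr, ih t' true hlen]
      · have hrep : pvRep2 (f+1) (c :: t) = c :: pvRep2 f t := by
          cases t with
          | nil => simp [pvRep2]
          | cons d t' =>
            by_cases hc : c = '\n'
            · by_cases hd : d = '\n'
              · exact absurd ⟨hc, t', by rw [hd]⟩ hnn
              · subst hc; cases t' <;> simp_all [pvRep2]
            · cases t' <;> simp_all [pvRep2]
        have hlen : t.length ≤ f := by simpa using h
        rw [hrep]
        by_cases hbr : pvBr c = true <;> cases b <;>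
          simp [pvJm, hbr, ih t _ hlen]

theorem pvA_toList (s : String) : (remove_empty s).toList = pvJm true s.toList := by
  simp only [remove_empty]
  have hl1 : (PySem.Str.replace s "\n\n" "\n").toList = pvRep2 s.toList.length s.toList := by
    rw [PySem.Str.toList_replace]
    show PySem.Chars.replace s.toList ['\n', '\n'] ['\n'] = _
    unfold PySem.Chars.replace
    rw [if_neg (by simp), pvR2 s.toList.length s.toList [] le_rfl]
    simp only [List.reverse_nil, List.nil_append]
  set s2 := PySem.Str.replace (PySem.Str.replace s "\n\n" "\n") "\r" "\n" with hs2
  set m := (pvRep2 s.toList.length s.toList).map pvSub with hm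
  have hl2 : s2.toList = m := by
    rw [hs2, PySem.Str.toList_replace, hl1]
    show PySem.Chars.replace _ ['\r'] ['\n'] = _
    unfold PySem.Chars.replace
    rw [if_neg (by simp), pvR1 _ _ [] le_rfl]
    simp only [List.reverse_nil, List.nil_append]
    exact hm.symm
  have hnr : '\r' ∉ m := by
    intro hmem
    rw [hm] at hmem
    obtain ⟨c, _, hcc⟩ := List.mem_map.1 hmem
    by_cases hx : c = '\r' <;> simp [pvSub, hx] at hcc
  obtain ⟨xs, hxs⟩ : ∃ xs, PySem.Str.split? s2 "\n" = some xs := by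
    unfold PySem.Str.split? PySem.Chars.split?
    rw [if_neg (by simp)]
    exact ⟨_, rfl⟩
  have hmap : xs.map String.toList = PySem.Chars.splitOn m ['\n'] := by
    have hbr := PySem.Str.split?_map s2 "\n"
    rw [hxs] at hbr
    have h2 : PySem.Chars.split? s2.toList "\n".toList = some (PySem.Chars.splitOn s2.toList ['\n']) := by
      show PySem.Chars.split? s2.toList ['\n'] = _
      unfold PySem.Chars.split?
      rw [if_neg (by simp)]
    rw [h2] at hbr
    simp only [Option.map_some, Option.some.injEq] at hbr
    rw [hbr, hl2]
  have hsplit : PySem.Chars.splitOn m ['\n'] = List.splitOnP pvBr m := by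
    unfold PySem.Chars.splitOn
    rw [pvS (m.length + 1) m [] [] (by omega)]
    simp only [List.reverse_nil, List.nil_append]
    rw [pvC1 m hnr]
    obtain ⟨g, gs, hg⟩ := List.exists_cons_of_ne_nil (List.splitOnP_ne_nil pvBr m)
    rw [hg]; simp
  rw [hxs]
  rw [show (some xs).getD ([] : List String) = xs from rfl]
  rw [PySem.Str.toList_join, PySem.List.foldl_append_ite_eq_filter]
  rw [List.nil_append]
  have hfil : (xs.filter (fun line => decide (0 < PySem.Str.len line))).map String.toList
      = (xs.map String.toList).filter (fun g => !g.isEmpty) := by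
    rw [List.filter_map,
      show (fun line : String => decide (0 < PySem.Str.len line)) = ((fun g : List Char => !g.isEmpty) ∘ String.toList) from
        funext fun x => by
          show decide (0 < PySem.Str.len x) = !x.toList.isEmpty
          rw [show PySem.Str.len x = (x.toList.length : Int) from rfl]
          cases x.toList <;> simp]
  rw [hfil, hmap, hsplit, show ("\n" : String).toList = ['\n'] from rfl, (pvMain m).1]
  rw [hm, pvMapSub, pvJ2 _ _ _ le_rfl]

-- ===== VERDICT (by name: the statement is the Claim_ definition above) =====
theorem remove_empty_spec : Claim_equal_remove_empty := by
  intro s _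
  unfold Spec_remove_empty
  rw [← String.toList_inj, pvA_toList, pvB_toList]
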